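-- pv_equiv track=rewrite | github.com/Aasthaengg/IBMdataset | Python_codes/p03014/s522833549.py | lamp
-- ===== SOURCE A (Python) =====
-- from itertools import groupby, chain
--
-- def lamp(arr):
--     count = [[] for i in range(len(arr))]
--     for i in range(len(arr)):
--         lamps = []
--         for key, value in groupby(arr[i]):
--             n = int(len(list(value)))
--             if key == '.':
--                 lamps += [n]*n
--             else:
--                 lamps += [0]*n
--         count[i] = lamps
--     return count
-- ===== SOURCE B (Python) =====
-- def lamp(arr):
--     res = []
--     for row in arr:
--         left = []
--         c = 0
--         for ch in row:
--             c = c + 1 if ch == '.' else 0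
--             left.append(c)
--         right = []
--         c = 0
--         for ch in reversed(row):
--             c = c + 1 if ch == '.' else 0
--             right.append(c)
--         right.reverse()
--         res.append([l + r - 1 if ch == '.' else 0
--                     for ch, l, r in zip(row, left, right)])
--     return res
-- ===== Notes on version B (the rewrite author's own statement) =====
-- stated objective: alternative
-- what changed: Replaces the groupby run-expansion with two cellwise prefix/suffix consecutive-dot count passes per row, combined as left+right-1 on '.' cells and 0 elsewhere.
import Mathlib
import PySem

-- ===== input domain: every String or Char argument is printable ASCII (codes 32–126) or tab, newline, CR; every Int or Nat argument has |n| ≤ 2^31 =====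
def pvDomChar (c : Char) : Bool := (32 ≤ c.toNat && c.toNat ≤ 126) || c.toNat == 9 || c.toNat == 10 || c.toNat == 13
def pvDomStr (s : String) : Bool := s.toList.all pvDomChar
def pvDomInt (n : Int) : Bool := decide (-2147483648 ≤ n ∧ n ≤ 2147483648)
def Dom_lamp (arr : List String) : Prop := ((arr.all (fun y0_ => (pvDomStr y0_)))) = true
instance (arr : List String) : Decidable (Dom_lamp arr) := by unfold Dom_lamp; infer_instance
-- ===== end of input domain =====

-- B replaces the groupby run-expansion with per-row forward/backward consecutive-'.' count passes combined cellwise (alternative decomposition, same cost).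

-- ===== PORT A =====
-- itertools.groupby over a row's characters: successive (key, run length) groups
def pvRuns : List Char → List (Char × Nat)
  | [] => []
  | c :: cs =>
    (c, (cs.takeWhile (· == c)).length + 1) :: pvRuns (cs.dropWhile (· == c))
termination_by cs => cs.length
decreasing_by
  exact Nat.lt_succ_of_le (List.length_dropWhile_le _ _)

-- inner loop: lamps += [n]*n if key == '.' else [0]*n, for each group
def pvRowA (s : String) : List Int :=
  (pvRuns s.toList).foldl
    (fun lamps kn =>
      lamps ++ (if kn.1 = '.' then List.replicate kn.2 (Int.ofNat kn.2)
                else List.replicate kn.2 0)) []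

def lamp (arr : List String) : List (List Int) := arr.map pvRowA

-- ===== PORT B =====
-- forward pass: running count of consecutive '.' ending at each cell
def pvLeftFrom : List Char → Int → List Int
  | [], _ => []
  | ch :: cs, c =>
    let c' := if ch = '.' then c + 1 else 0
    c' :: pvLeftFrom cs c'

def pvRowB (s : String) : List Int :=
  let cs := s.toList
  let left := pvLeftFrom cs 0
  let right := (pvLeftFrom cs.reverse 0).reverse
  (cs.zip (left.zip right)).map
    (fun x => if x.1 = '.' then x.2.1 + x.2.2 - 1 else 0)

def lamp_alt (arr : List String) : List (List Int) := arr.map pvRowB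

-- ===== PRECONDITION & SPEC =====
def Spec_lamp (arr : List String) (out : List (List Int)) : Prop := out = lamp_alt arr
instance (arr : List String) (out : List (List Int)) : Decidable (Spec_lamp arr out) := by unfold Spec_lamp; infer_instance

-- ===== CLAIM (what is proved, stated in full; the proofs are below) =====
def Claim_equal_lamp : Prop := ∀ (arr : List String), Dom_lamp arr → Spec_lamp arr (lamp arr)

-- ===== LEMMAS AND PROOFS =====

-- carry of the forward pass after consuming a list
def pvCarry : List Char → Int → Int
  | [], k => k
  | c :: cs, k => pvCarry cs (if c = '.' then k + 1 else 0)

theorem pvLeftFrom_append (xs ys : List Char) (k : Int) :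
    pvLeftFrom (xs ++ ys) k = pvLeftFrom xs k ++ pvLeftFrom ys (pvCarry xs k) := by
  induction xs generalizing k with
  | nil => simp [pvLeftFrom, pvCarry]
  | cons c cs ih => simp [pvLeftFrom, pvCarry, ih]

theorem pvCarry_append (xs ys : List Char) (k : Int) :
    pvCarry (xs ++ ys) k = pvCarry ys (pvCarry xs k) := by
  induction xs generalizing k with
  | nil => simp [pvCarry]
  | cons c cs ih => simp [pvCarry, ih]

theorem pvLeftFrom_length (xs : List Char) (k : Int) :
    (pvLeftFrom xs k).length = xs.length := by
  induction xs generalizing k with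
  | nil => simp [pvLeftFrom]
  | cons c cs ih => simp [pvLeftFrom, ih]

theorem pvLeftFrom_replicate_ne (m : Nat) (c : Char) (hc : ¬ c = '.') (k : Int) :
    pvLeftFrom (List.replicate m c) k = List.replicate m 0 := by
  induction m generalizing k with
  | zero => simp [pvLeftFrom]
  | succ n ih => simp [List.replicate_succ, pvLeftFrom, hc, ih]

theorem pvCarry_replicate_ne (m : Nat) (c : Char) (hc : ¬ c = '.') (k : Int) (hm : 1 ≤ m) :
    pvCarry (List.replicate m c) k = 0 := by
  induction m generalizing k with
  | zero => omega
  | succ n ih =>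
    simp only [List.replicate_succ, pvCarry, if_neg hc]
    cases n with
    | zero => simp [pvCarry]
    | succ p => exact ih _ (by omega)

theorem pvLeftFrom_replicate_dot (m : Nat) (k : Int) :
    pvLeftFrom (List.replicate m '.') k
      = (List.range m).map (fun i : Nat => k + 1 + (i : Int)) := by
  induction m generalizing k with
  | zero => simp [pvLeftFrom]
  | succ n ih =>
    rw [List.replicate_succ, List.range_succ_eq_map]
    simp only [pvLeftFrom, if_pos rfl, List.map_cons, List.map_map, ih]
    refine List.cons_eq_cons.mpr ⟨by simp, ?_⟩
    apply List.map_congr_left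
    intro i _
    simp only [Function.comp, Nat.succ_eq_add_one]
    push_cast
    ring

theorem pvCarry_replicate_dot (m : Nat) (k : Int) :
    pvCarry (List.replicate m '.') k = k + m := by
  induction m generalizing k with
  | zero => simp [pvCarry]
  | succ n ih =>
    simp [List.replicate_succ, pvCarry, ih]
    ring

theorem pvLeftFrom_reset (xs : List Char) (h : ∀ c ∈ xs.head?, ¬ c = '.') (k : Int) :
    pvLeftFrom xs k = pvLeftFrom xs 0 := by
  cases xs with
  | nil => rfl
  | cons c cs => simp [pvLeftFrom, h c rfl]

theorem pvCarry_reverse_zero (xs : List Char) (h : ∀ c ∈ xs.head?, ¬ c = '.') :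
    pvCarry xs.reverse 0 = 0 := by
  cases xs with
  | nil => simp [pvCarry]
  | cons c cs =>
    simp only [List.reverse_cons, pvCarry_append]
    simp [pvCarry, h c rfl]

-- row of B as a function of the character list
def pvRowBL (cs : List Char) : List Int :=
  (cs.zip ((pvLeftFrom cs 0).zip ((pvLeftFrom cs.reverse 0).reverse))).map
    (fun x => if x.1 = '.' then x.2.1 + x.2.2 - 1 else 0)

theorem pvRowB_eq (s : String) : pvRowB s = pvRowBL s.toList := rfl

theorem pvZipMap_rep (m : Nat) (c : Char) (hc : ¬ c = '.') (v w : List Int)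
    (hv : v.length = m) (hw : w.length = m) :
    ((List.replicate m c).zip (v.zip w)).map
      (fun x => if x.1 = '.' then x.2.1 + x.2.2 - 1 else 0)
      = List.replicate m (0 : Int) := by
  apply List.ext_getElem
  · simp [hv, hw]
  · intro i h1 h2
    have hi : i < m := by simpa using h2
    simp only [List.getElem_map, List.getElem_zip, List.getElem_replicate]
    simp [hc]

theorem pvDotBlock (m : Nat) :
    ((List.replicate m '.').zip
      (((List.range m).map (fun i : Nat => (0:Int) + 1 + (i : Int))).zip
        (((List.range m).map (fun i : Nat => (0:Int) + 1 + (i : Int))).reverse))).map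
      (fun x => if x.1 = '.' then x.2.1 + x.2.2 - 1 else 0)
      = List.replicate m ((m : Int)) := by
  apply List.ext_getElem
  · simp
  · intro i h1 h2
    have hi : i < m := by simpa using h2
    simp [List.getElem_reverse]
    omega

-- B's row splits at a maximal non-'.' run
theorem pvRowBL_ne (m : Nat) (c : Char) (hc : ¬ c = '.') (hm : 1 ≤ m) (rest : List Char) :
    pvRowBL (List.replicate m c ++ rest) = List.replicate m 0 ++ pvRowBL rest := by
  unfold pvRowBL
  rw [pvLeftFrom_append, pvCarry_replicate_ne m c hc 0 hm,
    pvLeftFrom_replicate_ne m c hc]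
  rw [List.reverse_append, List.reverse_replicate, pvLeftFrom_append,
    pvLeftFrom_replicate_ne m c hc, List.reverse_append, List.reverse_replicate]
  rw [List.zip_append (by simp [pvLeftFrom_length]),
    List.zip_append (by simp [pvLeftFrom_length]), List.map_append]
  rw [pvZipMap_rep m c hc _ _ (by simp) (by simp)]

-- B's row splits at a maximal '.' run followed by a non-'.' (or empty) rest
theorem pvRowBL_dot (m : Nat) (rest : List Char) (h : ∀ c ∈ rest.head?, ¬ c = '.') :
    pvRowBL (List.replicate m '.' ++ rest) = List.replicate m (m : Int) ++ pvRowBL rest := by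
  unfold pvRowBL
  rw [pvLeftFrom_append, pvLeftFrom_replicate_dot, pvCarry_replicate_dot,
    pvLeftFrom_reset rest h]
  rw [List.reverse_append, List.reverse_replicate, pvLeftFrom_append,
    pvCarry_reverse_zero rest h, pvLeftFrom_replicate_dot, List.reverse_append]
  rw [List.zip_append (by simp [pvLeftFrom_length]),
    List.zip_append (by simp [pvLeftFrom_length]), List.map_append]
  rw [pvDotBlock m]

-- A's fold of appends is a flatMap
def pvExpand (rs : List (Char × Nat)) : List Int :=
  rs.flatMap (fun kn => if kn.1 = '.' then List.replicate kn.2 (Int.ofNat kn.2)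
                        else List.replicate kn.2 0)

theorem pvFoldl_app (rs : List (Char × Nat)) (acc : List Int) :
    rs.foldl (fun lamps kn =>
      lamps ++ (if kn.1 = '.' then List.replicate kn.2 (Int.ofNat kn.2)
                else List.replicate kn.2 0)) acc = acc ++ pvExpand rs := by
  induction rs generalizing acc with
  | nil => simp [pvExpand]
  | cons r rs ih => simp [pvExpand, List.foldl_cons, ih, List.flatMap_def]

theorem pvHead_dropWhile {α : Type} (p : α → Bool) (l : List α) :
    ∀ c ∈ (l.dropWhile p).head?, p c = false := by
  induction l with
  | nil => intro c h; simp [List.dropWhile] at h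
  | cons a t ih =>
    intro c h
    rw [List.dropWhile_cons] at h
    by_cases hpa : p a = true
    · rw [if_pos hpa] at h; exact ih c h
    · rw [if_neg hpa] at h
      simp only [List.head?_cons, Option.mem_def, Option.some.injEq] at h
      subst h
      simpa using hpa

theorem pvMain : ∀ (n : Nat) (cs : List Char), cs.length ≤ n →
    pvExpand (pvRuns cs) = pvRowBL cs := by
  intro n
  induction n with
  | zero =>
    intro cs h
    have : cs = [] := List.eq_nil_of_length_eq_zero (by omega)
    subst this
    have hnil : pvRuns [] = [] := by rw [pvRuns.eq_def]
    simp [hnil, pvExpand, pvRowBL, pvLeftFrom]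
  | succ n ih =>
    intro cs h
    cases cs with
    | nil =>
      have hnil : pvRuns [] = [] := by rw [pvRuns.eq_def]
      simp [hnil, pvExpand, pvRowBL, pvLeftFrom]
    | cons c t =>
      have hdec : pvRuns (c :: t)
          = (c, (t.takeWhile (· == c)).length + 1) :: pvRuns (t.dropWhile (· == c)) := by
        rw [pvRuns.eq_def]
      set run := t.takeWhile (· == c) with hrun
      set rest := t.dropWhile (· == c) with hrest
      have hsplit : c :: t = List.replicate (run.length + 1) c ++ rest := by
        have h1 : run = List.replicate run.length c := by
          rw [List.eq_replicate_iff]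
          refine ⟨rfl, fun b hb => ?_⟩
          have := List.mem_takeWhile_imp hb
          simpa using this
        calc c :: t = c :: (run ++ rest) := by rw [List.takeWhile_append_dropWhile]
        _ = (c :: run) ++ rest := rfl
        _ = (c :: List.replicate run.length c) ++ rest := by rw [← h1]
        _ = List.replicate (run.length + 1) c ++ rest := by
              rw [List.replicate_succ]
      have hhead : ∀ x ∈ rest.head?, ¬ (x == c) = true :=
        fun x hx => by simpa using pvHead_dropWhile (· == c) t x hx
      have hlen : rest.length ≤ n := by
        have hd := List.length_dropWhile_le (· == c) t
        rw [← hrest] at hd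
        have ht : t.length ≤ n := by simpa using h
        omega
      have ihr := ih rest hlen
      rw [hdec]
      by_cases hc : c = '.'
      · subst hc
        have hh : ∀ x ∈ rest.head?, ¬ x = '.' := by
          intro x hx
          have := hhead x hx
          simpa using this
        rw [pvExpand, List.flatMap_cons, if_pos rfl]
        rw [hsplit, pvRowBL_dot (run.length + 1) rest hh, ← ihr]
        rfl
      · rw [pvExpand, List.flatMap_cons, if_neg hc]
        rw [hsplit, pvRowBL_ne (run.length + 1) c hc (by omega) rest, ← ihr]
        rfl

-- ===== VERDICT (by name: the statement is the Claim_ definition above) =====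
theorem lamp_spec : Claim_equal_lamp := by
  intro arr _
  unfold Spec_lamp lamp lamp_alt
  apply List.map_congr_left
  intro s _
  rw [pvRowB_eq]
  unfold pvRowA
  rw [pvFoldl_app, List.nil_append]
  exact pvMain s.toList.length s.toList (le_refl _)
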